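-- pv_equiv track=rewrite | github.com/Moxx-Company/Nomadly2 | advanced_routing_fix.py | find_remaining_conflicts
-- ===== SOURCE A (Python) =====
-- from typing import Dict, List, Set
--
-- def find_remaining_conflicts(patterns: Dict[str, Set[str]]) -> List[str]:
--     """Find any remaining routing conflicts"""
--
--     conflicts = []
--     all_patterns = set()
--
--     # Collect all patterns
--     for pattern_set in patterns.values():
--         all_patterns.update(pattern_set)
--
--     # Check for prefix conflicts
--     pattern_list = sorted(all_patterns)
--     for i, pattern1 in enumerate(pattern_list):
--         for pattern2 in pattern_list[i+1:]:
--             if pattern1 != pattern2: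
--                 # Check if one is a prefix of the other
--                 if (pattern1.startswith(pattern2) or pattern2.startswith(pattern1)):
--                     # Avoid false positives for namespaced patterns
--                     if not ('.' in pattern1 and '.' in pattern2):
--                         conflicts.append(f"{pattern1} conflicts with {pattern2}")
--
--     return conflicts
-- ===== SOURCE B (Python) =====
-- def find_remaining_conflicts(patterns):
--     """Find any remaining routing conflicts.
--
--     In the sorted, duplicate-free pattern list every string extending a
--     pattern p (i.e. having p as a prefix) sits in one contiguous block
--     immediately after p, so for each position we only scan forward while
--     the successor still starts with the current pattern, instead of
--     testing the prefix relation (both ways) against the whole tail.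
--     """
--     pattern_list = sorted({p for ps in patterns.values() for p in ps})
--     n = len(pattern_list)
--     conflicts = []
--     for i in range(n):
--         head = pattern_list[i]
--         j = i + 1
--         while j < n and pattern_list[j].startswith(head):
--             q = pattern_list[j]
--             if not ('.' in head and '.' in q):
--                 conflicts.append(f"{head} conflicts with {q}")
--             j += 1
--     return conflicts
-- ===== Notes on version B (the rewrite author's own statement) =====
-- stated objective: faster
-- what changed: B collects the patterns with one set comprehension and, instead of A's full quadratic tail scan testing the prefix relation both ways, walks the sorted list once, scanning forward from each pattern only while the successor still extends it (extensions form a contiguous block in sorted order); the Lean port of B is a structural recursion over the sorted list rather than A's indexed fold with slices.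
import Mathlib
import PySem

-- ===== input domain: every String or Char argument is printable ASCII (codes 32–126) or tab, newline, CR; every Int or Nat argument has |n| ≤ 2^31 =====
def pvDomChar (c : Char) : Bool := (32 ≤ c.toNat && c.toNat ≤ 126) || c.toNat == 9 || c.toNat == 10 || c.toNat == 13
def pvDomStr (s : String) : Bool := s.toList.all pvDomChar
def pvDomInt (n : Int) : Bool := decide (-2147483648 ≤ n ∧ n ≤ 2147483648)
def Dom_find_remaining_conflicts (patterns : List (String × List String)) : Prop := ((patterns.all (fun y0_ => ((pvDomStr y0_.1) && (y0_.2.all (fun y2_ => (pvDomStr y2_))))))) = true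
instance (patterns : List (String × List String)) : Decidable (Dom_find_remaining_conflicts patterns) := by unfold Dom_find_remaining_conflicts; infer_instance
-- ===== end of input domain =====

-- B replaces A's full quadratic tail scan by a single walk over the sorted list that,
-- at each pattern, only scans forward while the successor still extends it (extensions
-- are contiguous in sorted order); equivalence of the RETURN value is what is proved.

-- ===== PORT A =====
def find_remaining_conflicts (patterns : List (String × List String)) : List String :=
  -- conflicts = []; all_patterns = set(); for pattern_set in patterns.values(): all_patterns.update(pattern_set)
  let all_patterns : PySem.Set String :=
    patterns.foldl (fun s kv => PySem.Set.update s kv.2) PySem.Set.empty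
  -- pattern_list = sorted(all_patterns)
  let pattern_list := PySem.List.sorted all_patterns (fun x => x)
  -- for i, pattern1 in enumerate(pattern_list): for pattern2 in pattern_list[i+1:]: …
  (PySem.List.enumerate pattern_list).foldl (fun conflicts ip =>
    (PySem.List.slice pattern_list (some (ip.1 + 1)) none).foldl (fun conflicts p2 =>
      if ip.2 ≠ p2 then
        if PySem.Str.startswith ip.2 p2 || PySem.Str.startswith p2 ip.2 then
          if !(PySem.Str.isIn "." ip.2 && PySem.Str.isIn "." p2) then
            conflicts ++ [ip.2 ++ " conflicts with " ++ p2]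
          else conflicts
        else conflicts
      else conflicts) conflicts) []

-- ===== PORT B =====
-- the inner 'while j < n and pattern_list[j].startswith(head)' scan, as the obvious
-- structural recursion over the part of the sorted list after the current position
def pvBlockB (head : String) : List String → List String
  | [] => []
  | q :: qs =>
    if PySem.Str.startswith q head then
      (if PySem.Str.isIn "." head && PySem.Str.isIn "." q then []
       else [head ++ " conflicts with " ++ q]) ++ pvBlockB head qs
    else []

-- the outer 'for i in range(n)' walk: each step takes the pattern at the current
-- position as head and scans the rest of the list
def pvGoB : List String → List String
  | [] => []
  | head :: rest => pvBlockB head rest ++ pvGoB rest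

def find_remaining_conflicts_alt (patterns : List (String × List String)) : List String :=
  -- pattern_list = sorted({p for ps in patterns.values() for p in ps})
  pvGoB (PySem.List.sorted (PySem.Set.ofList (patterns.flatMap (fun kv => kv.2))) (fun x => x))

-- ===== PRECONDITION & SPEC =====
def Spec_find_remaining_conflicts (patterns : List (String × List String)) (out : List String) : Prop := out = find_remaining_conflicts_alt patterns
instance (patterns : List (String × List String)) (out : List String) : Decidable (Spec_find_remaining_conflicts patterns out) := by unfold Spec_find_remaining_conflicts; infer_instance

-- ===== CLAIM (what is proved, stated in full; the proofs are below) =====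
def Claim_equal_find_remaining_conflicts : Prop := ∀ (patterns : List (String × List String)), Dom_find_remaining_conflicts patterns → Spec_find_remaining_conflicts patterns (find_remaining_conflicts patterns)

-- ===== LEMMAS AND PROOFS =====

lemma collect_fold (t : List (String × List String)) : ∀ s : PySem.Set String,
    t.foldl (fun s kv => PySem.Set.update s kv.2) s
      = (t.flatMap (fun kv => kv.2)).foldl PySem.Set.add s := by
  induction t with
  | nil => intro s; rfl
  | cons a tl ih =>
    intro s
    rw [List.foldl_cons, List.flatMap_cons, List.foldl_append, ih]
    rfl

-- A's running set-union fold and B's one-shot set of the flattened values build the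
-- SAME list (same elements in the same first-insertion order)
lemma collect_eq (patterns : List (String × List String)) :
    patterns.foldl (fun s kv => PySem.Set.update s kv.2) PySem.Set.empty
      = PySem.Set.ofList (patterns.flatMap (fun kv => kv.2)) := by
  rw [PySem.Set.ofList_eq_foldl]; exact collect_fold patterns _

-- a proper prefix is lexicographically ≤ (List Char)
lemma prefix_not_lt (p x : List Char) (h : p <+: x) : ¬ List.Lex (· < ·) x p := by
  induction p generalizing x with
  | nil => intro hlt; cases hlt
  | cons c p' ih =>
    obtain ⟨r, rfl⟩ := h
    intro hlt
    cases hlt with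
    | rel h' => exact lt_irrefl _ h'
    | cons h' => exact ih _ ⟨r, rfl⟩ h'

-- the key geometric fact: p ≤ x ≤ y and p a prefix of y ⇒ p a prefix of x
lemma prefix_of_between (p x y : List Char) (hpx : ¬ List.Lex (· < ·) x p)
    (hxy : ¬ List.Lex (· < ·) y x) (h : p <+: y) : p <+: x := by
  induction p generalizing x y with
  | nil => exact List.nil_prefix
  | cons c p' ih =>
    obtain ⟨r, rfl⟩ := h
    cases x with
    | nil => exact absurd List.Lex.nil hpx
    | cons d x' =>
      rcases lt_trichotomy d c with hdc | rfl | hcd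
      · exact absurd (List.Lex.rel hdc) hpx
      · have hpx' : ¬ List.Lex (· < ·) x' p' := fun hl => hpx (List.Lex.cons hl)
        have hxy' : ¬ List.Lex (· < ·) (p' ++ r) x' := fun hl => hxy (List.Lex.cons hl)
        obtain ⟨t, rfl⟩ := ih x' (p' ++ r) hpx' hxy' ⟨r, rfl⟩
        exact ⟨t, rfl⟩
      · exact absurd (List.Lex.rel hcd) hxy

lemma filter_eq_takeWhile_of_closed {α : Type} (p : α → Bool) (l : List α)
    (h : l.Pairwise (fun x y => p y = true → p x = true)) :
    l.filter p = l.takeWhile p := by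
  induction l with
  | nil => rfl
  | cons a t ih =>
    rcases List.pairwise_cons.1 h with ⟨ha, ht⟩
    by_cases hpa : p a = true
    · simp [hpa, ih ht]
    · have ht0 : t.filter p = [] :=
        List.filter_eq_nil_iff.2 (fun x hx hpx => hpa (ha x hx hpx))
      simp [hpa, ht0]

lemma startswith_false_of_lt (a b : String) (h : a < b) :
    PySem.Str.startswith a b = false := by
  rw [PySem.Str.startswith_eq]
  rcases Bool.eq_false_or_eq_true (PySem.Chars.startswith a.toList b.toList) with h1 | h0
  · exact absurd (String.lt_iff_toList_lt.1 h)
      (prefix_not_lt _ _ ((PySem.Chars.startswith_iff _ _).1 h1))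
  · exact h0

-- B's inner recursion computes the takeWhile-block, filtered and formatted
lemma blockB_eq (head : String) (l : List String) :
    pvBlockB head l =
      ((l.takeWhile (fun q => PySem.Str.startswith q head)).filter
          (fun q => !(PySem.Str.isIn "." head && PySem.Str.isIn "." q))).map
        (fun q => head ++ " conflicts with " ++ q) := by
  induction l with
  | nil => rfl
  | cons q qs ih =>
    rw [pvBlockB, List.takeWhile_cons]
    cases hsw : PySem.Str.startswith q head
    · simp
    · rw [if_pos rfl, if_pos rfl, List.filter_cons]
      cases hd : (PySem.Str.isIn "." head && PySem.Str.isIn "." q) <;>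
        simp only [hd, Bool.not_false, Bool.not_true, ih, List.map_cons,
          List.nil_append, List.singleton_append, Bool.false_eq_true, reduceIte]

-- per-row equality of A's inner loop with B's block, on a strictly sorted list
lemma inner_eq (pl : List String) (hs : pl.Pairwise (· < ·)) (i : Nat)
    (hi : i < pl.length) (acc : List String) :
    (PySem.List.slice pl (some ((i : Int) + 1)) none).foldl (fun conflicts p2 =>
      if pl[i] ≠ p2 then
        if PySem.Str.startswith pl[i] p2 || PySem.Str.startswith p2 pl[i] then
          if !(PySem.Str.isIn "." pl[i] && PySem.Str.isIn "." p2) then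
            conflicts ++ [pl[i] ++ " conflicts with " ++ p2]
          else conflicts
        else conflicts
      else conflicts) acc =
    acc ++ pvBlockB pl[i] (pl.drop (i + 1)) := by
  have h1 : (0:Int) ≤ (i : Int) + 1 := by positivity
  have htn : ((i : Int) + 1).toNat = i + 1 := by omega
  rw [PySem.List.slice_from pl h1, htn, blockB_eq]
  have hgt : ∀ x ∈ pl.drop (i+1), pl[i] < x := by
    intro x hx
    obtain ⟨m, hm, rfl⟩ := List.mem_iff_getElem.1 hx
    rw [List.getElem_drop]
    exact List.pairwise_iff_getElem.1 hs i (i+1+m) hi (by simp [List.length_drop] at hm; omega) (by omega)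
  have hpoint : ∀ (a : List String), ∀ p2 ∈ pl.drop (i+1),
      (if pl[i] ≠ p2 then
        if PySem.Str.startswith pl[i] p2 || PySem.Str.startswith p2 pl[i] then
          if !(PySem.Str.isIn "." pl[i] && PySem.Str.isIn "." p2) then
            a ++ [pl[i] ++ " conflicts with " ++ p2]
          else a
        else a
      else a) =
      (if (PySem.Str.startswith p2 pl[i] &&
            !(PySem.Str.isIn "." pl[i] && PySem.Str.isIn "." p2)) then
        a ++ [pl[i] ++ " conflicts with " ++ p2] else a) := by
    intro a p2 hp2
    have hlt := hgt p2 hp2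
    have hne : pl[i] ≠ p2 := ne_of_lt hlt
    have hsw : PySem.Str.startswith pl[i] p2 = false := startswith_false_of_lt _ _ hlt
    cases hsw2 : PySem.Str.startswith p2 pl[i] <;>
      cases hd : (PySem.Str.isIn "." pl[i] && PySem.Str.isIn "." p2) <;>
        simp [hne, hsw, -PySem.Str.startswith_eq]
  rw [PySem.List.foldl_congr_mem _ _ _ acc hpoint, PySem.List.foldl_append_if]
  have hclosed : (pl.drop (i+1)).Pairwise
      (fun x y => PySem.Str.startswith y pl[i] = true →
                  PySem.Str.startswith x pl[i] = true) := by
    refine (List.Pairwise.drop hs (i := i+1)).imp_of_mem ?_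
    intro x y hx hy hxy hswy
    rw [PySem.Str.startswith_eq, PySem.Chars.startswith_iff] at hswy ⊢
    refine prefix_of_between _ _ y.toList ?_ ?_ hswy
    · exact fun hl => absurd (String.lt_iff_toList_lt.2 hl) (lt_asymm (hgt x hx))
    · exact fun hl => absurd (String.lt_iff_toList_lt.2 hl) (lt_asymm hxy)
  congr 1
  rw [← filter_eq_takeWhile_of_closed _ _ hclosed, List.filter_filter]
  congr 1
  apply List.filter_congr
  intro x _
  exact Bool.and_comm _ _

-- the enumerate-indexed row sum is B's structural recursion over the list
lemma flatMap_enumerate_eq_goB :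
    ∀ (l big : List String) (s : Int), 0 ≤ s → big.drop s.toNat = l →
    (PySem.List.enumerate l s).flatMap
        (fun ip => pvBlockB ip.2 (big.drop ((ip.1 + 1).toNat))) = pvGoB l := by
  intro l
  induction l with
  | nil => intro big s _ _; simp [PySem.List.enumerate_nil, pvGoB]
  | cons x xs ih =>
    intro big s hs hdrop
    rw [PySem.List.enumerate_cons, List.flatMap_cons, pvGoB]
    have hts : (s + 1).toNat = s.toNat + 1 := by omega
    have hdrop' : big.drop (s.toNat + 1) = xs := by
      rw [← List.drop_drop, hdrop]; rfl
    rw [hts, hdrop', ih big (s + 1) (by omega) (by rw [hts, hdrop'])]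

-- ===== VERDICT (by name: the statement is the Claim_ definition above) =====
theorem find_remaining_conflicts_spec : Claim_equal_find_remaining_conflicts := by
  intro patterns _
  show find_remaining_conflicts patterns = find_remaining_conflicts_alt patterns
  unfold find_remaining_conflicts find_remaining_conflicts_alt
  rw [collect_eq]
  set pl := PySem.List.sorted
    (PySem.Set.ofList (patterns.flatMap (fun kv => kv.2))) (fun x => x) with hpl
  have hs : pl.Pairwise (· < ·) := PySem.List.sorted_ofList_pairwise_lt _
  have hrow : ∀ (acc : List String), ∀ ip ∈ PySem.List.enumerate pl,
      (PySem.List.slice pl (some (ip.1 + 1)) none).foldl (fun conflicts p2 =>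
        if ip.2 ≠ p2 then
          if PySem.Str.startswith ip.2 p2 || PySem.Str.startswith p2 ip.2 then
            if !(PySem.Str.isIn "." ip.2 && PySem.Str.isIn "." p2) then
              conflicts ++ [ip.2 ++ " conflicts with " ++ p2]
            else conflicts
          else conflicts
        else conflicts) acc =
      acc ++ pvBlockB ip.2 (pl.drop ((ip.1 + 1).toNat)) := by
    intro acc ip hip
    obtain ⟨k, hk, rfl⟩ := (PySem.List.mem_enumerate_iff _ _ _).1 hip
    have hz : (0 : Int) + (k : Int) = (k : Int) := by omega
    have htn : (((k : Int)) + 1).toNat = k + 1 := by omega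
    simp only [hz, htn]
    exact inner_eq pl hs k hk acc
  rw [PySem.List.foldl_congr_mem _ _ _ [] hrow, PySem.List.foldl_append_eq_flatMap,
    List.nil_append]
  exact flatMap_enumerate_eq_goB pl pl 0 le_rfl rfl
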